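-- pv_equiv track=rewrite | github.com/victorycross/OFR-Issue-Tracker | tools/azure-function/generate_deck/export_data.py | build_update_map
-- ===== SOURCE A (Python) =====
-- from collections import defaultdict
--
-- def build_update_map(raw_updates):
--     """Build a dict mapping ParentItemID -> list of update records, sorted newest first."""
--     update_map = defaultdict(list)
--     for item in raw_updates:
--         fields = item.get("fields", {})
--         parent_id = fields.get("ParentItemID", "")
--         if not parent_id:
--             continue
--
--         update = {
--             "Date": fields.get("UpdateDate", "")[:10] if fields.get("UpdateDate") else "",
--             "Status": fields.get("StatusAtUpdate", ""),
--             "Notes": fields.get("Notes", ""),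
--             "UpdatedBy": fields.get("UpdatedBy", ""),
--         }
--         update_map[parent_id].append(update)
--
--     # Sort each issue's updates by date descending (newest first)
--     for parent_id in update_map:
--         update_map[parent_id].sort(key=lambda u: u["Date"], reverse=True)
--
--     return update_map
-- ===== SOURCE B (Python) =====
-- def build_update_map(raw_updates):
--     """Build a dict mapping ParentItemID -> list of update records, sorted newest first.
--
--     Different decomposition: extract a flat (parent_id, update) pair list, do ONE
--     global stable sort by Date descending, then group into a dict whose keys are
--     pre-registered in first-appearance order."""
--     pairs = []
--     for item in raw_updates:
--         fields = item.get("fields", {})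
--         parent_id = fields.get("ParentItemID", "")
--         if not parent_id:
--             continue
--         pairs.append((parent_id, {
--             "Date": fields.get("UpdateDate", "")[:10] if fields.get("UpdateDate") else "",
--             "Status": fields.get("StatusAtUpdate", ""),
--             "Notes": fields.get("Notes", ""),
--             "UpdatedBy": fields.get("UpdatedBy", ""),
--         }))
--     update_map = {pid: [] for pid, _ in pairs}
--     for pid, upd in sorted(pairs, key=lambda p: p[1]["Date"], reverse=True):
--         update_map[pid].append(upd)
--     return update_map
-- ===== Notes on version B (the rewrite author's own statement) =====
-- stated objective: alternative
-- what changed: A groups updates per parent first and then sorts each bucket separately; B builds a flat (parent_id, update) pair list, pre-registers the keys in first-appearance order, performs ONE global stable sort by Date descending, and fills the buckets in a single pass (stability preserves A's tie order).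
import Mathlib
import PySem

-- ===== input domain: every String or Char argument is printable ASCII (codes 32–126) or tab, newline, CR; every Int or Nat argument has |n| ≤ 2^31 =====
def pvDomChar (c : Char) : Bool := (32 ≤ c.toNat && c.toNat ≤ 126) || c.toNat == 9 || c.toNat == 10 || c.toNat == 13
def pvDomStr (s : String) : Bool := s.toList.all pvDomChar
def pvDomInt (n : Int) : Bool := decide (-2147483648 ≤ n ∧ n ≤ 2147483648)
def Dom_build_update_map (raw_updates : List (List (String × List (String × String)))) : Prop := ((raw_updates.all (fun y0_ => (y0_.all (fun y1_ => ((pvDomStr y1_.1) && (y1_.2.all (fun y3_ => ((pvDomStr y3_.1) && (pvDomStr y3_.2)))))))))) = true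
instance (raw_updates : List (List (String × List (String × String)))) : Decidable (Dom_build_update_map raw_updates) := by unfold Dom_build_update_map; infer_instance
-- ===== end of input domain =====

-- B replaces A's group-then-sort-each-bucket by extract-pairs / one global stable sort / one grouping
-- pass (objective: alternative decomposition); equivalence of the RETURN value is proved below.

-- the update record literal both Pythons build, verbatim:
--   {"Date": fields.get("UpdateDate","")[:10] if fields.get("UpdateDate") else "", "Status": …, "Notes": …, "UpdatedBy": …}
def pvMkUpdate (fields : List (String × String)) : List (String × String) :=
  let fd := PySem.Dict.mk fields
  [("Date", if fd.getD "UpdateDate" "" = "" then "" else PySem.Str.slice (fd.getD "UpdateDate" "") none (some 10)),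
   ("Status", fd.getD "StatusAtUpdate" ""),
   ("Notes", fd.getD "Notes" ""),
   ("UpdatedBy", fd.getD "UpdatedBy" "")]

-- ===== PORT A =====
-- update_map[parent_id].append(update) on a defaultdict(list) is modify with default [];
-- update_map[parent_id].sort(key=…, reverse=True) rewrites the value in place (insert keeps the key's position);
-- u["Date"] is read as getD "Date" "" — exact, every record built above carries the key "Date".
def build_update_map (raw_updates : List (List (String × List (String × String)))) : List (String × List (List (String × String))) :=
  let update_map := raw_updates.foldl (fun d item =>
    let fields := (PySem.Dict.mk item).getD "fields" []
    let parent_id := (PySem.Dict.mk fields).getD "ParentItemID" ""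
    if parent_id = "" then d
    else d.modify parent_id [] (fun x => x ++ [pvMkUpdate fields])) PySem.Dict.empty
  let update_map2 := update_map.keys.foldl (fun d k =>
    d.insert k (PySem.List.sorted (d.getD k []) (fun u => (PySem.Dict.mk u).getD "Date" "") true)) update_map
  update_map2.items

-- ===== PORT B =====
-- pairs list, then {pid: [] …} (dict comprehension), then one pass over the globally sorted pairs;
-- update_map[pid].append(upd) finds the key always present, so modify with default [] is exact.
def build_update_map_alt (raw_updates : List (List (String × List (String × String)))) : List (String × List (List (String × String))) :=
  let pairs := raw_updates.foldl (fun acc item =>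
    let fields := (PySem.Dict.mk item).getD "fields" []
    let parent_id := (PySem.Dict.mk fields).getD "ParentItemID" ""
    if parent_id = "" then acc
    else acc ++ [(parent_id, pvMkUpdate fields)]) []
  let update_map0 := pairs.foldl (fun d p => d.insert p.1 ([] : List (List (String × String)))) PySem.Dict.empty
  let update_map := (PySem.List.sorted pairs (fun p => (PySem.Dict.mk p.2).getD "Date" "") true).foldl
    (fun d p => d.modify p.1 [] (fun x => x ++ [p.2])) update_map0
  update_map.items

-- ===== PRECONDITION & SPEC =====
def Spec_build_update_map (raw_updates : List (List (String × List (String × String)))) (out : List (String × List (List (String × String)))) : Prop := out = build_update_map_alt raw_updates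
instance (raw_updates : List (List (String × List (String × String)))) (out : List (String × List (List (String × String)))) : Decidable (Spec_build_update_map raw_updates out) := by unfold Spec_build_update_map; infer_instance

-- ===== CLAIM (what is proved, stated in full; the proofs are below) =====
def Claim_equal_build_update_map : Prop := ∀ (raw_updates : List (List (String × List (String × String)))), Dom_build_update_map raw_updates → Spec_build_update_map raw_updates (build_update_map raw_updates)

-- ===== LEMMAS AND PROOFS =====

-- the flat (parent_id, update) list both programs are about
def pvPairsOf (raw_updates : List (List (String × List (String × String)))) : List (String × List (String × String)) :=
  raw_updates.flatMap (fun item =>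
    let fields := (PySem.Dict.mk item).getD "fields" []
    let parent_id := (PySem.Dict.mk fields).getD "ParentItemID" ""
    if parent_id = "" then [] else [(parent_id, pvMkUpdate fields)])

-- B's accumulation loop produces pvPairsOf
lemma pv_pairs_eq (raw : List (List (String × List (String × String)))) (acc : List (String × List (String × String))) :
    raw.foldl (fun acc item =>
      let fields := (PySem.Dict.mk item).getD "fields" []
      let parent_id := (PySem.Dict.mk fields).getD "ParentItemID" ""
      if parent_id = "" then acc
      else acc ++ [(parent_id, pvMkUpdate fields)]) acc = acc ++ pvPairsOf raw := by
  induction raw generalizing acc with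
  | nil => simp [pvPairsOf]
  | cons item rest ih =>
    simp only [List.foldl_cons, pvPairsOf, List.flatMap_cons]
    split_ifs with h <;> simp [ih, pvPairsOf]

-- A's grouping loop is the modify-append fold over pvPairsOf
lemma pv_group_eq (raw : List (List (String × List (String × String)))) (d : PySem.Dict String (List (List (String × String)))) :
    raw.foldl (fun d item =>
      let fields := (PySem.Dict.mk item).getD "fields" []
      let parent_id := (PySem.Dict.mk fields).getD "ParentItemID" ""
      if parent_id = "" then d
      else d.modify parent_id [] (fun x => x ++ [pvMkUpdate fields])) d
    = (pvPairsOf raw).foldl (fun d p => d.modify p.1 [] (fun x => x ++ [p.2])) d := by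
  induction raw generalizing d with
  | nil => simp [pvPairsOf]
  | cons item rest ih =>
    simp only [List.foldl_cons, pvPairsOf, List.flatMap_cons]
    split_ifs with h <;> simp [ih, pvPairsOf]

-- Set.update by elements already present is the identity
lemma pv_update_of_subset {s : List String} {l : List String} (h : ∀ x ∈ l, x ∈ s) :
    PySem.Set.update s l = s := by
  induction l generalizing s with
  | nil => rfl
  | cons x l ih =>
    have hx : PySem.Set.contains s x = true := by
      unfold PySem.Set.contains; exact List.elem_eq_true_of_mem (h x (by simp))
    show PySem.Set.update (PySem.Set.add s x) l = s
    rw [show PySem.Set.add s x = s from by unfold PySem.Set.add; rw [hx]; simp]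
    exact ih (fun y hy => h y (by simp [hy]))

-- insertBy puts x at the head when the list is empty or x goes before the head
lemma pv_insertBy_head {α : Type} (bef : α → α → Bool) (x : α) (l : List α)
    (h : ∀ y, l.head? = some y → bef x y = true) :
    PySem.List.insertBy bef x l = x :: l := by
  cases l with
  | nil => rfl
  | cons y ys => simp [PySem.List.insertBy, h y rfl]

-- insertBy into a key-descending list keeps it key-descending
lemma pv_pairwise_insertBy {α κ : Type} [LinearOrder κ] (key : α → κ) (x : α) (l : List α)
    (h : l.Pairwise (fun a b => key b ≤ key a)) :
    (PySem.List.insertBy (fun a b => decide (key b < key a)) x l).Pairwise (fun a b => key b ≤ key a) := by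
  induction l with
  | nil => simp [PySem.List.insertBy]
  | cons y ys ih =>
    rcases List.pairwise_cons.mp h with ⟨hy, hys⟩
    by_cases hb : key y < key x
    · simp only [PySem.List.insertBy, hb, decide_true, if_true]
      exact List.pairwise_cons.mpr ⟨by
        intro z hz
        rcases List.mem_cons.mp hz with rfl | hz
        · exact le_of_lt hb
        · exact (hy z hz).trans (le_of_lt hb), h⟩
    · simp only [PySem.List.insertBy, hb, decide_false, Bool.false_eq_true, if_false]
      refine List.pairwise_cons.mpr ⟨?_, ih hys⟩
      intro z hz
      rcases (PySem.List.mem_insertBy _ _ _ _).mp hz with rfl | hz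
      · exact not_lt.mp hb
      · exact hy z hz

-- filter commutes with insertBy into a key-descending list
lemma pv_filter_insertBy {α κ : Type} [LinearOrder κ] (key : α → κ) (p : α → Bool) (x : α) (l : List α)
    (h : l.Pairwise (fun a b => key b ≤ key a)) :
    (PySem.List.insertBy (fun a b => decide (key b < key a)) x l).filter p
      = if p x then PySem.List.insertBy (fun a b => decide (key b < key a)) x (l.filter p) else l.filter p := by
  induction l with
  | nil => cases hpx : p x <;> simp [PySem.List.insertBy, List.filter, hpx]
  | cons y ys ih =>
    rcases List.pairwise_cons.mp h with ⟨hy, hys⟩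
    by_cases hb : key y < key x
    · simp only [PySem.List.insertBy, hb, decide_true, if_true]
      cases hpx : p x with
      | false => simp [List.filter, hpx]
      | true =>
        simp only [List.filter, hpx, if_true]
        rw [pv_insertBy_head]
        intro z hz
        have hzm : z ∈ y :: ys := by
          have := List.filter_sublist (l := y :: ys) (p := p)
          exact this.mem (List.mem_of_mem_head? hz)
        have : key z ≤ key y := by
          rcases List.mem_cons.mp hzm with rfl | hzm
          · exact le_refl _
          · exact hy z hzm
        simpa using lt_of_le_of_lt this hb
    · simp only [PySem.List.insertBy, hb, decide_false, Bool.false_eq_true, if_false]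
      cases hpy : p y with
      | true =>
        simp only [List.filter, hpy, ih hys]
        cases hpx : p x with
        | false => simp
        | true =>
          simp only [if_true]
          rw [show PySem.List.insertBy (fun a b => decide (key b < key a)) x (y :: ys.filter p)
              = y :: PySem.List.insertBy (fun a b => decide (key b < key a)) x (ys.filter p) from by
            simp [PySem.List.insertBy, hb]]
      | false =>
        simp only [List.filter, hpy, ih hys]

-- filter commutes with the whole reverse-stable sort
lemma pv_filter_foldl_insertBy {α κ : Type} [LinearOrder κ] (key : α → κ) (p : α → Bool)
    (xs : List α) (acc : List α) (h : acc.Pairwise (fun a b => key b ≤ key a)) :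
    (xs.foldl (fun acc x => PySem.List.insertBy (fun a b => decide (key b < key a)) x acc) acc).filter p
      = (xs.filter p).foldl (fun acc x => PySem.List.insertBy (fun a b => decide (key b < key a)) x acc) (acc.filter p) := by
  induction xs generalizing acc with
  | nil => rfl
  | cons x xs ih =>
    simp only [List.foldl_cons, List.filter]
    rw [ih _ (pv_pairwise_insertBy key x acc h), pv_filter_insertBy key p x acc h]
    cases hpx : p x <;> simp

lemma pv_filter_sorted {α κ : Type} [LinearOrder κ] (key : α → κ) (p : α → Bool) (xs : List α) :
    (PySem.List.sorted xs key true).filter p = PySem.List.sorted (xs.filter p) key true := by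
  rw [PySem.List.sorted_rev_eq_foldl_insertBy, PySem.List.sorted_rev_eq_foldl_insertBy]
  simpa using pv_filter_foldl_insertBy key p xs [] (by simp)

-- map commutes with insertBy when the comparison factors through the map
lemma pv_map_insertBy {α β : Type} (bef : β → β → Bool) (f : α → β) (x : α) (l : List α) :
    (PySem.List.insertBy (fun a b => bef (f a) (f b)) x l).map f
      = PySem.List.insertBy bef (f x) (l.map f) := by
  induction l with
  | nil => rfl
  | cons y ys ih =>
    by_cases hb : bef (f x) (f y) = true <;>
      simp [PySem.List.insertBy, hb, ih]

lemma pv_map_foldl_insertBy {α β : Type} (bef : β → β → Bool) (f : α → β) (xs : List α) (acc : List α) :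
    (xs.foldl (fun acc x => PySem.List.insertBy (fun a b => bef (f a) (f b)) x acc) acc).map f
      = (xs.map f).foldl (fun acc x => PySem.List.insertBy bef x acc) (acc.map f) := by
  induction xs generalizing acc with
  | nil => rfl
  | cons x xs ih => simp only [List.foldl_cons, List.map_cons, ih, pv_map_insertBy]

lemma pv_map_sorted {α β κ : Type} [LinearOrder κ] (key : β → κ) (f : α → β) (xs : List α) :
    PySem.List.sorted (xs.map f) key true = (PySem.List.sorted xs (fun x => key (f x)) true).map f := by
  rw [PySem.List.sorted_rev_eq_foldl_insertBy, PySem.List.sorted_rev_eq_foldl_insertBy]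
  exact (pv_map_foldl_insertBy (fun a b => decide (key b < key a)) f xs []).symm

-- the CORE stability fact: per-key bucket of the global reverse-stable sort = reverse-stable sort of the bucket
lemma pv_bucket_sorted (pairs : List (String × List (String × String))) (k : String) :
    PySem.List.sorted ((pairs.filter (fun p => p.1 == k)).map (fun p => p.2))
        (fun u => (PySem.Dict.mk u).getD "Date" "") true
      = ((PySem.List.sorted pairs (fun p => (PySem.Dict.mk p.2).getD "Date" "") true).filter
          (fun p => p.1 == k)).map (fun p => p.2) := by
  rw [pv_filter_sorted, pv_map_sorted]

-- the per-key rewrite loop of A: on a nodup key list, each key gets F of its old value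
lemma pv_keyloop_getD {F : String → List (List (String × String)) → List (List (String × String))}
    (ks : List String) (hnd : ks.Nodup) (m : PySem.Dict String (List (List (String × String)))) (k : String) :
    (ks.foldl (fun d k => d.insert k (F k (d.getD k []))) m).getD k []
      = if k ∈ ks then F k (m.getD k []) else m.getD k [] := by
  induction ks generalizing m with
  | nil => simp
  | cons k0 ks ih =>
    rcases List.nodup_cons.mp hnd with ⟨hk0, hnd'⟩
    simp only [List.foldl_cons, ih hnd', List.mem_cons]
    by_cases hk : k = k0
    · subst hk
      simp [hk0, PySem.Dict.getD_insert_self]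
    · rw [PySem.Dict.getD_insert_of_ne _ _ _ hk]
      by_cases hmem : k ∈ ks <;> simp [hmem, hk]

-- B's key-seeding loop stores [] at every key
lemma pv_seed_getD (pairs : List (String × List (String × String)))
    (d : PySem.Dict String (List (List (String × String)))) (k : String)
    (h : d.getD k [] = []) :
    (pairs.foldl (fun d p => d.insert p.1 ([] : List (List (String × String)))) d).getD k [] = [] := by
  induction pairs generalizing d with
  | nil => exact h
  | cons p ps ih =>
    refine ih _ ?_
    by_cases hk : k = p.1
    · subst hk; simp [PySem.Dict.getD_insert_self]
    · rw [PySem.Dict.getD_insert_of_ne _ _ _ hk]; exact h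

-- ===== VERDICT (by name: the statement is the Claim_ definition above) =====
theorem build_update_map_spec : Claim_equal_build_update_map := by
  intro raw _
  show build_update_map raw = build_update_map_alt raw
  unfold build_update_map build_update_map_alt
  rw [pv_group_eq, pv_pairs_eq]
  simp only [List.nil_append]
  set pairs := pvPairsOf raw with hp
  set updKey : List (String × String) → String := fun u => (PySem.Dict.mk u).getD "Date" "" with hukey
  set m : PySem.Dict String (List (List (String × String))) :=
    pairs.foldl (fun d p => d.modify p.1 [] (fun x => x ++ [p.2])) PySem.Dict.empty with hm
  set m0 : PySem.Dict String (List (List (String × String))) :=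
    pairs.foldl (fun d p => d.insert p.1 ([] : List (List (String × String)))) PySem.Dict.empty with hm0
  set sp := PySem.List.sorted pairs (fun p => updKey p.2) true with hsp
  set mB : PySem.Dict String (List (List (String × String))) :=
    sp.foldl (fun d p => d.modify p.1 [] (fun x => x ++ [p.2])) m0 with hmB
  set m2 : PySem.Dict String (List (List (String × String))) :=
    m.keys.foldl (fun d k => d.insert k (PySem.List.sorted (d.getD k []) updKey true)) m with hm2
  -- keys
  have hmkeys : m.keys = PySem.Set.update (PySem.Dict.empty : PySem.Dict String (List (List (String × String)))).keys (pairs.map (fun p => p.1)) := by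
    rw [hm]; exact PySem.Dict.keys_foldl_modify_key pairs (fun p => p.1) [] (fun _ p v => v ++ [p.2]) _
  have hm0keys : m0.keys = PySem.Set.update (PySem.Dict.empty : PySem.Dict String (List (List (String × String)))).keys (pairs.map (fun p => p.1)) := by
    rw [hm0]; exact PySem.Dict.keys_foldl_insert_key pairs (fun p => p.1) (fun _ _ => []) _
  have hmnd : m.keys.Nodup :=
    PySem.Dict.nodup_keys_foldl_modify_key pairs (fun p => p.1) [] (fun _ p v => v ++ [p.2]) _ PySem.Dict.nodup_keys_empty
  have hkeys0 : PySem.Set.update (PySem.Dict.empty : PySem.Dict String (List (List (String × String)))).keys (pairs.map (fun p => p.1)) = PySem.Set.ofList (pairs.map (fun p => p.1)) := rfl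
  have hmem_keys : ∀ k, k ∈ m.keys ↔ k ∈ pairs.map (fun p => p.1) := by
    intro k; rw [hmkeys, hkeys0]; exact PySem.Set.mem_ofList _ _
  have hm2keys : m2.keys = m.keys := by
    rw [hm2, PySem.Dict.keys_foldl_insert]
    exact pv_update_of_subset (fun x hx => hx)
  have hmBkeys : mB.keys = m.keys := by
    rw [hmB, PySem.Dict.keys_foldl_modify_key sp (fun p => p.1) [] (fun _ p v => v ++ [p.2]) m0, hm0keys, ← hmkeys]
    refine pv_update_of_subset ?_
    intro x hx
    rcases List.mem_map.mp hx with ⟨p, hpmem, rfl⟩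
    exact (hmem_keys _).mpr (List.mem_map_of_mem (by rw [hsp] at hpmem; exact (PySem.List.mem_sorted _ _ _ _).mp hpmem))
  -- values
  have hmget : ∀ k, m.getD k [] = (pairs.filter (fun p => p.1 == k)).map (fun p => p.2) := by
    intro k; rw [hm]
    simpa using PySem.Dict.getD_foldl_modify_append pairs PySem.Dict.empty k
  have hm2get : ∀ k ∈ m.keys, m2.getD k [] = PySem.List.sorted (m.getD k []) updKey true := by
    intro k hk
    rw [hm2, pv_keyloop_getD (F := fun _ v => PySem.List.sorted v updKey true) m.keys hmnd m k]
    simp [hk]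
  have hmBget : ∀ k, mB.getD k [] = (sp.filter (fun p => p.1 == k)).map (fun p => p.2) := by
    intro k
    rw [hmB]
    rw [PySem.Dict.getD_foldl_modify_append sp m0 k, hm0, pv_seed_getD _ _ _ (by simp)]
    simp
  have hval : ∀ k ∈ m.keys, m2.getD k [] = mB.getD k [] := by
    intro k hk
    rw [hm2get k hk, hmBget k, hmget k, pv_bucket_sorted]
  -- items
  have hm2nd : m2.keys.Nodup := by rw [hm2keys]; exact hmnd
  have hmBnd : mB.keys.Nodup := by rw [hmBkeys]; exact hmnd
  rw [PySem.Dict.items_eq_map_keys m2 hm2nd [], PySem.Dict.items_eq_map_keys mB hmBnd [], hm2keys, hmBkeys]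
  exact List.map_congr_left (fun k hk => by rw [hval k hk])
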